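-- pv_equiv track=rewrite | github.com/Spookiel/CompetitiveProgramming | NWERC/2018/Game Design/Game Design.py | check_hor_range
-- ===== SOURCE A (Python) =====
-- def check_hor_range(y, sx, ex, walls):
--     if sx < ex:
--         for i in range(sx, ex+1):
--             if (i, y) in walls:
--                 return i
--     else:
--         for i in range(sx, ex, -1):
--             if (i, y) in walls:
--                 return i
--
--     return ex
--
-- walls = set()
-- ===== SOURCE B (Python) =====
-- def check_hor_range(y, sx, ex, walls):
--     # One pass over the wall set instead of scanning the coordinate range:
--     # keep the wall on row y inside the scan interval that is closest to sx.
--     best = None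
--     if sx < ex:
--         for (wx, wy) in walls:
--             if wy == y and sx <= wx and wx <= ex and (best is None or wx < best):
--                 best = wx
--     else:
--         for (wx, wy) in walls:
--             if wy == y and ex < wx and wx <= sx and (best is None or wx > best):
--                 best = wx
--     return ex if best is None else best
-- ===== Notes on version B (the rewrite author's own statement) =====
-- stated objective: alternative
-- what changed: B iterates once over the wall set keeping the in-interval wall on row y closest to sx (min x forward, max x backward), instead of A's scan over every coordinate of the range probing the set.
import Mathlib
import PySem

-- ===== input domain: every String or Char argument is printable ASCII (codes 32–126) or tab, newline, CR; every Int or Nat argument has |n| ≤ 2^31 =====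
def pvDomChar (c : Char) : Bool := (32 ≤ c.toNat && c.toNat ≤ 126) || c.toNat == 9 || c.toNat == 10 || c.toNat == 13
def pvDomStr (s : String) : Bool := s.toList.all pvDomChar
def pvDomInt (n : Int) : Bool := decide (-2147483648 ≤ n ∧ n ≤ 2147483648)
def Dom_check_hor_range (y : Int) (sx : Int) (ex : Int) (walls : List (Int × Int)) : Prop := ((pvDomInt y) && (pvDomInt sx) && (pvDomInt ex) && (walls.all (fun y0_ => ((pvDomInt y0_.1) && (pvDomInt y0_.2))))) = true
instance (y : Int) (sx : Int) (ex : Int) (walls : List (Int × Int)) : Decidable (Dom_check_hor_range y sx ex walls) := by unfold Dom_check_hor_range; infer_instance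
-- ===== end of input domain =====

-- B replaces A's scan over the coordinate range by a single pass over the wall list
-- keeping the in-interval wall on row y closest to sx (objective: alternative).

-- ===== PORT A =====
-- A scans i over range(sx, ex+1) (resp. range(sx, ex, -1)) and returns the first i
-- with (i, y) in walls, else ex.
def check_hor_range (y : Int) (sx : Int) (ex : Int) (walls : List (Int × Int)) : Int :=
  if sx < ex then
    match (PySem.List.pyRange sx (ex + 1) 1).find? (fun i => decide ((i, y) ∈ walls)) with
    | some i => i
    | none => ex
  else
    match (PySem.List.pyRange sx ex (-1)).find? (fun i => decide ((i, y) ∈ walls)) with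
    | some i => i
    | none => ex

-- ===== PORT B =====
-- Source B's loop body for the forward case: keep the smallest candidate x.
def chrStepF (y : Int) (sx : Int) (ex : Int) (best : Option Int) (p : Int × Int) : Option Int :=
  if p.2 = y ∧ sx ≤ p.1 ∧ p.1 ≤ ex then
    match best with
    | none => some p.1
    | some b => if p.1 < b then some p.1 else some b
  else best

-- Source B's loop body for the backward case: keep the largest candidate x.
def chrStepB (y : Int) (sx : Int) (ex : Int) (best : Option Int) (p : Int × Int) : Option Int :=
  if p.2 = y ∧ ex < p.1 ∧ p.1 ≤ sx then
    match best with
    | none => some p.1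
    | some b => if b < p.1 then some p.1 else some b
  else best

def check_hor_range_alt (y : Int) (sx : Int) (ex : Int) (walls : List (Int × Int)) : Int :=
  let best :=
    if sx < ex then walls.foldl (chrStepF y sx ex) none
    else walls.foldl (chrStepB y sx ex) none
  match best with
  | none => ex
  | some b => b

-- ===== PRECONDITION & SPEC =====
def Spec_check_hor_range (y : Int) (sx : Int) (ex : Int) (walls : List (Int × Int)) (out : Int) : Prop := out = check_hor_range_alt y sx ex walls
instance (y : Int) (sx : Int) (ex : Int) (walls : List (Int × Int)) (out : Int) : Decidable (Spec_check_hor_range y sx ex walls out) := by unfold Spec_check_hor_range; infer_instance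

-- ===== CLAIM (what is proved, stated in full; the proofs are below) =====
def Claim_equal_check_hor_range : Prop := ∀ (y : Int) (sx : Int) (ex : Int) (walls : List (Int × Int)), Dom_check_hor_range y sx ex walls → Spec_check_hor_range y sx ex walls (check_hor_range y sx ex walls)

-- ===== LEMMAS AND PROOFS =====

-- On a strictly increasing list, find? returns the least element satisfying p.
theorem find?_sorted_lt_some (l : List Int) (hl : l.Pairwise (· < ·)) (p : Int → Bool)
    (r : Int) (h : l.find? p = some r) :
    p r = true ∧ r ∈ l ∧ ∀ j ∈ l, p j = true → r ≤ j := by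
  induction l with
  | nil => simp at h
  | cons a t ih =>
    rcases List.pairwise_cons.mp hl with ⟨ha, ht⟩
    by_cases hp : p a = true
    · rw [List.find?_cons_of_pos hp] at h
      cases h
      refine ⟨hp, List.mem_cons_self, ?_⟩
      intro j hj _
      rcases List.mem_cons.mp hj with rfl | hj
      · exact le_refl _
      · exact le_of_lt (ha j hj)
    · rw [List.find?_cons_of_neg (by simpa using hp)] at h
      rcases ih ht h with ⟨h1, h2, h3⟩
      refine ⟨h1, List.mem_cons_of_mem _ h2, ?_⟩
      intro j hj hpj
      rcases List.mem_cons.mp hj with rfl | hj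
      · exact absurd hpj hp
      · exact h3 j hj hpj

-- On a strictly decreasing list, find? returns the greatest element satisfying p.
theorem find?_sorted_gt_some (l : List Int) (hl : l.Pairwise (· > ·)) (p : Int → Bool)
    (r : Int) (h : l.find? p = some r) :
    p r = true ∧ r ∈ l ∧ ∀ j ∈ l, p j = true → j ≤ r := by
  induction l with
  | nil => simp at h
  | cons a t ih =>
    rcases List.pairwise_cons.mp hl with ⟨ha, ht⟩
    by_cases hp : p a = true
    · rw [List.find?_cons_of_pos hp] at h
      cases h
      refine ⟨hp, List.mem_cons_self, ?_⟩
      intro j hj _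
      rcases List.mem_cons.mp hj with rfl | hj
      · exact le_refl _
      · exact le_of_lt (ha j hj)
    · rw [List.find?_cons_of_neg (by simpa using hp)] at h
      rcases ih ht h with ⟨h1, h2, h3⟩
      refine ⟨h1, List.mem_cons_of_mem _ h2, ?_⟩
      intro j hj hpj
      rcases List.mem_cons.mp hj with rfl | hj
      · exact absurd hpj hp
      · exact h3 j hj hpj

theorem pyRange_neg_one_pairwise_gt (a b : Int) :
    (PySem.List.pyRange a b (-1)).Pairwise (· > ·) := by
  rw [PySem.List.pyRange_neg_one_eq_reverse]
  exact List.pairwise_reverse.mpr (PySem.List.pairwise_lt_pyRange_one _ _)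

-- Invariant of B's forward fold: it computes the minimum of acc and all candidate x's.
theorem foldF_char (y sx ex : Int) (l : List (Int × Int)) : ∀ acc : Option Int,
    (l.foldl (chrStepF y sx ex) acc = none →
      acc = none ∧ ∀ p ∈ l, ¬(p.2 = y ∧ sx ≤ p.1 ∧ p.1 ≤ ex)) ∧
    (∀ m, l.foldl (chrStepF y sx ex) acc = some m →
      (acc = some m ∨ ∃ p ∈ l, (p.2 = y ∧ sx ≤ p.1 ∧ p.1 ≤ ex) ∧ p.1 = m) ∧
      (∀ b, acc = some b → m ≤ b) ∧
      ∀ p ∈ l, (p.2 = y ∧ sx ≤ p.1 ∧ p.1 ≤ ex) → m ≤ p.1) := by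
  induction l with
  | nil => intro acc; constructor
           · intro h; exact ⟨by simpa using h, by simp⟩
           · intro m h; simp at h; exact ⟨Or.inl (by simp [h]), fun b hb => by simp [h] at hb; simp [hb], by simp⟩
  | cons q t ih =>
    intro acc
    have step := ih (chrStepF y sx ex acc q)
    constructor
    · intro h
      rcases (step.1) h with ⟨hs, hrest⟩
      by_cases hc : q.2 = y ∧ sx ≤ q.1 ∧ q.1 ≤ ex
      · exfalso
        cases acc with
        | none => simp [chrStepF, hc] at hs
        | some b => by_cases hlt : q.1 < b <;> simp [chrStepF, hc, hlt] at hs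
      · have hstep : chrStepF y sx ex acc q = acc := by simp [chrStepF, hc]
        rw [hstep] at hs
        refine ⟨hs, ?_⟩
        intro p hp
        rcases List.mem_cons.mp hp with rfl | hp
        · exact hc
        · exact hrest p hp
    · intro m h
      rcases (step.2) m h with ⟨hsrc, hle, hmin⟩
      by_cases hc : q.2 = y ∧ sx ≤ q.1 ∧ q.1 ≤ ex
      · cases acc with
        | none =>
          have hstep : chrStepF y sx ex none q = some q.1 := by simp [chrStepF, hc]
          rw [hstep] at hsrc hle
          refine ⟨Or.inr ?_, by simp, ?_⟩
          · rcases hsrc with hsrc | ⟨p, hp, hcp, hpm⟩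
            · exact ⟨q, List.mem_cons_self, hc, by cases hsrc; rfl⟩
            · exact ⟨p, List.mem_cons_of_mem _ hp, hcp, hpm⟩
          · intro p hp hcp
            rcases List.mem_cons.mp hp with rfl | hp
            · exact hle p.1 rfl
            · exact hmin p hp hcp
        | some b =>
          by_cases hlt : q.1 < b
          · have hstep : chrStepF y sx ex (some b) q = some q.1 := by
              simp [chrStepF, hc, hlt]
            rw [hstep] at hsrc hle
            refine ⟨Or.inr ?_, ?_, ?_⟩
            · rcases hsrc with hsrc | ⟨p, hp, hcp, hpm⟩
              · exact ⟨q, List.mem_cons_self, hc, by cases hsrc; rfl⟩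
              · exact ⟨p, List.mem_cons_of_mem _ hp, hcp, hpm⟩
            · intro b' hb'; cases hb'
              exact le_of_lt (lt_of_le_of_lt (hle q.1 rfl) hlt)
            · intro p hp hcp
              rcases List.mem_cons.mp hp with rfl | hp
              · exact hle p.1 rfl
              · exact hmin p hp hcp
          · have hstep : chrStepF y sx ex (some b) q = some b := by
              simp [chrStepF, hc, hlt]
            rw [hstep] at hsrc hle
            refine ⟨?_, ?_, ?_⟩
            · rcases hsrc with hsrc | ⟨p, hp, hcp, hpm⟩
              · exact Or.inl hsrc
              · exact Or.inr ⟨p, List.mem_cons_of_mem _ hp, hcp, hpm⟩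
            · intro b' hb'; cases hb'; exact hle b rfl
            · intro p hp hcp
              rcases List.mem_cons.mp hp with rfl | hp
              · exact le_trans (hle b rfl) (le_of_not_gt hlt)
              · exact hmin p hp hcp
      · have hstep : chrStepF y sx ex acc q = acc := by simp [chrStepF, hc]
        rw [hstep] at hsrc hle
        refine ⟨?_, hle, ?_⟩
        · rcases hsrc with hsrc | ⟨p, hp, hcp, hpm⟩
          · exact Or.inl hsrc
          · exact Or.inr ⟨p, List.mem_cons_of_mem _ hp, hcp, hpm⟩
        · intro p hp hcp
          rcases List.mem_cons.mp hp with rfl | hp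
          · exact absurd hcp hc
          · exact hmin p hp hcp

-- Invariant of B's backward fold: it computes the maximum of acc and all candidate x's.
theorem foldB_char (y sx ex : Int) (l : List (Int × Int)) : ∀ acc : Option Int,
    (l.foldl (chrStepB y sx ex) acc = none →
      acc = none ∧ ∀ p ∈ l, ¬(p.2 = y ∧ ex < p.1 ∧ p.1 ≤ sx)) ∧
    (∀ m, l.foldl (chrStepB y sx ex) acc = some m →
      (acc = some m ∨ ∃ p ∈ l, (p.2 = y ∧ ex < p.1 ∧ p.1 ≤ sx) ∧ p.1 = m) ∧
      (∀ b, acc = some b → b ≤ m) ∧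
      ∀ p ∈ l, (p.2 = y ∧ ex < p.1 ∧ p.1 ≤ sx) → p.1 ≤ m) := by
  induction l with
  | nil => intro acc; constructor
           · intro h; exact ⟨by simpa using h, by simp⟩
           · intro m h; simp at h; exact ⟨Or.inl (by simp [h]), fun b hb => by simp [h] at hb; simp [hb], by simp⟩
  | cons q t ih =>
    intro acc
    have step := ih (chrStepB y sx ex acc q)
    constructor
    · intro h
      rcases (step.1) h with ⟨hs, hrest⟩
      by_cases hc : q.2 = y ∧ ex < q.1 ∧ q.1 ≤ sx
      · exfalso
        cases acc with
        | none => simp [chrStepB, hc] at hs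
        | some b => by_cases hlt : b < q.1 <;> simp [chrStepB, hc, hlt] at hs
      · have hstep : chrStepB y sx ex acc q = acc := by simp [chrStepB, hc]
        rw [hstep] at hs
        refine ⟨hs, ?_⟩
        intro p hp
        rcases List.mem_cons.mp hp with rfl | hp
        · exact hc
        · exact hrest p hp
    · intro m h
      rcases (step.2) m h with ⟨hsrc, hle, hmax⟩
      by_cases hc : q.2 = y ∧ ex < q.1 ∧ q.1 ≤ sx
      · cases acc with
        | none =>
          have hstep : chrStepB y sx ex none q = some q.1 := by simp [chrStepB, hc]
          rw [hstep] at hsrc hle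
          refine ⟨Or.inr ?_, by simp, ?_⟩
          · rcases hsrc with hsrc | ⟨p, hp, hcp, hpm⟩
            · exact ⟨q, List.mem_cons_self, hc, by cases hsrc; rfl⟩
            · exact ⟨p, List.mem_cons_of_mem _ hp, hcp, hpm⟩
          · intro p hp hcp
            rcases List.mem_cons.mp hp with rfl | hp
            · exact hle p.1 rfl
            · exact hmax p hp hcp
        | some b =>
          by_cases hlt : b < q.1
          · have hstep : chrStepB y sx ex (some b) q = some q.1 := by
              simp [chrStepB, hc, hlt]
            rw [hstep] at hsrc hle
            refine ⟨Or.inr ?_, ?_, ?_⟩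
            · rcases hsrc with hsrc | ⟨p, hp, hcp, hpm⟩
              · exact ⟨q, List.mem_cons_self, hc, by cases hsrc; rfl⟩
              · exact ⟨p, List.mem_cons_of_mem _ hp, hcp, hpm⟩
            · intro b' hb'; cases hb'
              exact le_of_lt (lt_of_lt_of_le hlt (hle q.1 rfl))
            · intro p hp hcp
              rcases List.mem_cons.mp hp with rfl | hp
              · exact hle p.1 rfl
              · exact hmax p hp hcp
          · have hstep : chrStepB y sx ex (some b) q = some b := by
              simp [chrStepB, hc, hlt]
            rw [hstep] at hsrc hle
            refine ⟨?_, ?_, ?_⟩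
            · rcases hsrc with hsrc | ⟨p, hp, hcp, hpm⟩
              · exact Or.inl hsrc
              · exact Or.inr ⟨p, List.mem_cons_of_mem _ hp, hcp, hpm⟩
            · intro b' hb'; cases hb'; exact hle b rfl
            · intro p hp hcp
              rcases List.mem_cons.mp hp with rfl | hp
              · exact le_trans (le_of_not_gt hlt) (hle b rfl)
              · exact hmax p hp hcp
      · have hstep : chrStepB y sx ex acc q = acc := by simp [chrStepB, hc]
        rw [hstep] at hsrc hle
        refine ⟨?_, hle, ?_⟩
        · rcases hsrc with hsrc | ⟨p, hp, hcp, hpm⟩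
          · exact Or.inl hsrc
          · exact Or.inr ⟨p, List.mem_cons_of_mem _ hp, hcp, hpm⟩
        · intro p hp hcp
          rcases List.mem_cons.mp hp with rfl | hp
          · exact absurd hcp hc
          · exact hmax p hp hcp

-- ===== VERDICT (by name: the statement is the Claim_ definition above) =====
theorem check_hor_range_spec : Claim_equal_check_hor_range := by
  intro y sx ex walls _
  unfold Spec_check_hor_range check_hor_range check_hor_range_alt
  by_cases hdir : sx < ex
  · simp only [if_pos hdir]
    cases hA : (PySem.List.pyRange sx (ex + 1) 1).find? (fun i => decide ((i, y) ∈ walls)) with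
    | none =>
      cases hB : walls.foldl (chrStepF y sx ex) none with
      | none => rfl
      | some m =>
        exfalso
        rcases ((foldF_char y sx ex walls none).2 m hB).1 with hm | ⟨p, hp, hcp, hpm⟩
        · simp at hm
        · have hmem : (m, y) ∈ walls := by
            have : p = (m, y) := Prod.ext hpm hcp.1
            rwa [this] at hp
          have hin : m ∈ PySem.List.pyRange sx (ex + 1) 1 :=
            (PySem.List.mem_pyRange_one).mpr ⟨hpm ▸ hcp.2.1, by have := hpm ▸ hcp.2.2; omega⟩
          have := List.find?_eq_none.mp hA m hin
          simp at this
          exact this hmem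
    | some r =>
      rcases find?_sorted_lt_some _ (PySem.List.pairwise_lt_pyRange_one _ _) _ r hA
        with ⟨hpr, hrmem, hrmin⟩
      have hrw : (r, y) ∈ walls := by simpa using hpr
      have hrbnd := (PySem.List.mem_pyRange_one).mp hrmem
      cases hB : walls.foldl (chrStepF y sx ex) none with
      | none =>
        exfalso
        exact ((foldF_char y sx ex walls none).1 hB).2 (r, y) hrw ⟨rfl, hrbnd.1, by omega⟩
      | some m =>
        rcases (foldF_char y sx ex walls none).2 m hB with ⟨hsrc, _, hmin⟩
        rcases hsrc with hm | ⟨p, hp, hcp, hpm⟩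
        · exact absurd hm (by simp)
        · have hmw : (m, y) ∈ walls := by
            have : p = (m, y) := Prod.ext hpm hcp.1
            rwa [this] at hp
          have h1 : m ≤ r := hmin (r, y) hrw ⟨rfl, hrbnd.1, by omega⟩
          have h2 : r ≤ m := by
            refine hrmin m ((PySem.List.mem_pyRange_one).mpr ⟨hpm ▸ hcp.2.1, by have := hpm ▸ hcp.2.2; omega⟩) ?_
            simpa using hmw
          simp [le_antisymm h1 h2]
  · simp only [if_neg hdir]
    cases hA : (PySem.List.pyRange sx ex (-1)).find? (fun i => decide ((i, y) ∈ walls)) with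
    | none =>
      cases hB : walls.foldl (chrStepB y sx ex) none with
      | none => rfl
      | some m =>
        exfalso
        rcases ((foldB_char y sx ex walls none).2 m hB).1 with hm | ⟨p, hp, hcp, hpm⟩
        · simp at hm
        · have hmem : (m, y) ∈ walls := by
            have : p = (m, y) := Prod.ext hpm hcp.1
            rwa [this] at hp
          have hin : m ∈ PySem.List.pyRange sx ex (-1) :=
            (PySem.List.mem_pyRange_neg_one).mpr ⟨hpm ▸ hcp.2.1, hpm ▸ hcp.2.2⟩
          have := List.find?_eq_none.mp hA m hin
          simp at this
          exact this hmem
    | some r =>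
      rcases find?_sorted_gt_some _ (pyRange_neg_one_pairwise_gt _ _) _ r hA
        with ⟨hpr, hrmem, hrmax⟩
      have hrw : (r, y) ∈ walls := by simpa using hpr
      have hrbnd := (PySem.List.mem_pyRange_neg_one).mp hrmem
      cases hB : walls.foldl (chrStepB y sx ex) none with
      | none =>
        exfalso
        exact ((foldB_char y sx ex walls none).1 hB).2 (r, y) hrw ⟨rfl, hrbnd.1, hrbnd.2⟩
      | some m =>
        rcases (foldB_char y sx ex walls none).2 m hB with ⟨hsrc, _, hmax⟩
        rcases hsrc with hm | ⟨p, hp, hcp, hpm⟩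
        · exact absurd hm (by simp)
        · have hmw : (m, y) ∈ walls := by
            have : p = (m, y) := Prod.ext hpm hcp.1
            rwa [this] at hp
          have h1 : r ≤ m := hmax (r, y) hrw ⟨rfl, hrbnd.1, hrbnd.2⟩
          have h2 : m ≤ r := by
            refine hrmax m ((PySem.List.mem_pyRange_neg_one).mpr ⟨hpm ▸ hcp.2.1, hpm ▸ hcp.2.2⟩) ?_
            simpa using hmw
          simp [le_antisymm h1 h2]
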